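-- pv_equiv track=rewrite | github.com/Margarita-Yazykova/AiSD | .idea/lab_5_1_2part.py | gen_parts
-- ===== SOURCE A (Python) =====
-- def gen_parts(n, min_size, max_size):
--     def split(remain, curr):
--         if not remain:  # Если никого не осталось, проверяем корректность разбиения
--             if len(curr) > 1 and all(len(group) >= min_size for group in curr):
--                 res.append(curr) #если сходится, добавляем человека туда либо ниже создаем новую группу с этим человеком
--             return
--         person = remain[0]
--         for i in range(len(curr)):
--             if len(curr[i]) < max_size:  # Добавляем в существующую группу
--                 split(remain[1:], curr[:i] + [curr[i] + [person]] + curr[i + 1:])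
--         split(remain[1:], curr + [[person]])  # Создаем новую группу
--     res = []
--     split(list(range(1, n + 1)), [])
--     return res
-- ===== SOURCE B (Python) =====
-- # Breadth-first: iteratively expand all partial partitions person by person, then filter leaves.
-- def _expand(c, person, max_size):
--     return [c[:i] + [c[i] + [person]] + c[i + 1:]
--             for i in range(len(c)) if len(c[i]) < max_size] + [c + [[person]]]
--
-- def gen_parts(n, min_size, max_size):
--     states = [[]]
--     for person in range(1, n + 1):
--         states = [child for c in states for child in _expand(c, person, max_size)]
--     return [c for c in states if len(c) > 1 and all(len(g) >= min_size for g in c)]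
-- ===== Notes on version B (the rewrite author's own statement) =====
-- stated objective: alternative
-- what changed: Replaces the depth-first recursion over remaining persons with an iterative breadth-first pass: a fold that expands the whole list of partial partitions one person at a time, then one final filter for the size conditions.
import Mathlib
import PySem

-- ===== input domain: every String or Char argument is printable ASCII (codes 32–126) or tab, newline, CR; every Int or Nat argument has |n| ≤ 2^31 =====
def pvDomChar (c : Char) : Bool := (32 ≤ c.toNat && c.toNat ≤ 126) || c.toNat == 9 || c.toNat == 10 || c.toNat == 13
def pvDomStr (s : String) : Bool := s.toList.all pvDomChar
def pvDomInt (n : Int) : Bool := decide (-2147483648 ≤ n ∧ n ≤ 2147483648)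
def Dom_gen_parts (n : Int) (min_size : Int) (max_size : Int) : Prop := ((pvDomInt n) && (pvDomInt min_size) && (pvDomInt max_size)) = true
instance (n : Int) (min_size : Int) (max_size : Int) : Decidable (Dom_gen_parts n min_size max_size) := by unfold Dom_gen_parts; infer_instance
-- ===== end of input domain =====

-- B replaces A's depth-first recursion with an iterative breadth-first expansion plus a final filter (objective: alternative decomposition; same output, same cost).

-- ===== PORT A =====
-- the inner recursive 'split' (res is threaded as the returned list, appended in call order)
def pvSplitA (mn mx : Int) (remain : List Int) (curr : List (List Int)) : List (List (List Int)) :=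
  match remain with
  | [] =>
      if 1 < curr.length && curr.all (fun g => decide (mn ≤ (g.length : Int))) then [curr] else []
  | person :: rest =>
      ((List.range curr.length).foldl
        (fun acc i =>
          if ((curr.getD i []).length : Int) < mx then
            acc ++ pvSplitA mn mx rest (curr.take i ++ [(curr.getD i []) ++ [person]] ++ curr.drop (i + 1))
          else acc) [])
      ++ pvSplitA mn mx rest (curr ++ [[person]])
termination_by remain.length
decreasing_by all_goals simp

def gen_parts (n : Int) (min_size : Int) (max_size : Int) : List (List (List Int)) :=
  pvSplitA min_size max_size (PySem.List.pyRange 1 (n + 1) 1) []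

-- ===== PORT B =====
-- all one-person extensions of a partial partition c (Source B's _expand)
def pvExpandB (mx person : Int) (c : List (List Int)) : List (List (List Int)) :=
  (((List.range c.length).filter (fun i => decide (((c.getD i []).length : Int) < mx))).map
      (fun i => c.take i ++ [(c.getD i []) ++ [person]] ++ c.drop (i + 1)))
  ++ [c ++ [[person]]]

def gen_parts_alt (n : Int) (min_size : Int) (max_size : Int) : List (List (List Int)) :=
  ((PySem.List.pyRange 1 (n + 1) 1).foldl
      (fun states person => states.flatMap (pvExpandB max_size person)) [[]]).filter
    (fun c => 1 < c.length && c.all (fun g => decide (min_size ≤ (g.length : Int))))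

-- ===== PRECONDITION & SPEC =====
def Spec_gen_parts (n : Int) (min_size : Int) (max_size : Int) (out : List (List (List Int))) : Prop := out = gen_parts_alt n min_size max_size
instance (n : Int) (min_size : Int) (max_size : Int) (out : List (List (List Int))) : Decidable (Spec_gen_parts n min_size max_size out) := by unfold Spec_gen_parts; infer_instance

-- ===== CLAIM (what is proved, stated in full; the proofs are below) =====
def Claim_equal_gen_parts : Prop := ∀ (n : Int) (min_size : Int) (max_size : Int), Dom_gen_parts n min_size max_size → Spec_gen_parts n min_size max_size (gen_parts n min_size max_size)

-- ===== LEMMAS AND PROOFS =====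

-- 'for x in l: if P x: out += f x' as filter+flatMap
theorem pv_foldl_ite_append {α β : Type} (P : α → Prop) [DecidablePred P] (f : α → List β)
    (l : List α) (acc : List β) :
    l.foldl (fun a x => if P x then a ++ f x else a) acc
      = acc ++ (l.filter (fun x => decide (P x))).flatMap f := by
  induction l generalizing acc with
  | nil => simp
  | cons x xs ih =>
      by_cases h : P x <;> simp [List.foldl_cons, h, ih, List.append_assoc]

theorem pv_flatMap_ite_singleton {α : Type} (p : α → Bool) (l : List α) :
    l.flatMap (fun c => if p c then [c] else []) = l.filter p := by
  induction l with
  | nil => rfl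
  | cons x xs ih => by_cases h : p x <;> simp [List.flatMap_cons, h, ih]

theorem pvSplitA_cons (mn mx person : Int) (rest : List Int) (curr : List (List Int)) :
    pvSplitA mn mx (person :: rest) curr
      = (pvExpandB mx person curr).flatMap (fun c => pvSplitA mn mx rest c) := by
  rw [pvSplitA]
  rw [pv_foldl_ite_append (fun i => ((curr.getD i []).length : Int) < mx)]
  simp [pvExpandB, List.flatMap_append, List.flatMap_map]

-- depth-first leaves of every state = breadth-first expansion then filter
theorem pv_bfs (mn mx : Int) (remain : List Int) (states : List (List (List Int))) :
    states.flatMap (fun c => pvSplitA mn mx remain c)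
      = (remain.foldl (fun s person => s.flatMap (pvExpandB mx person)) states).filter
          (fun c => 1 < c.length && c.all (fun g => decide (mn ≤ (g.length : Int)))) := by
  induction remain generalizing states with
  | nil =>
      simp only [List.foldl_nil]
      rw [← pv_flatMap_ite_singleton]
      congr 1
      funext c
      rw [pvSplitA]
  | cons person rest ih =>
      simp only [List.foldl_cons]
      rw [← ih (states.flatMap (pvExpandB mx person)), List.flatMap_assoc]
      congr 1
      funext c
      exact pvSplitA_cons mn mx person rest c

-- ===== VERDICT (by name: the statement is the Claim_ definition above) =====
theorem gen_parts_spec : Claim_equal_gen_parts := by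
  intro n mn mx hdom
  unfold Spec_gen_parts gen_parts gen_parts_alt
  have h := pv_bfs mn mx (PySem.List.pyRange 1 (n + 1) 1) [[]]
  simpa using h
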